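-- pv_equiv track=rewrite | github.com/cyberkrunk69/Scout | src/scout/batch_expression.py | _find_variable_end
-- ===== SOURCE A (Python) =====
-- def _find_variable_end(expression: str) -> int:
--     """
--     Find the closing } for a ${ variable.
--
--     Strategy:
--     - Scan forward from start
--     - If we hit } AND next non-space char is operator (<, >, ==, !=, etc) → closing brace
--     - If we hit } AND next char is . or alphanumeric → part of variable name
--     - If we hit } AND it's end of string → closing brace
--     """
--     operators = ['<', '>', '=', '!', 'a', 'o', 'n']  # Start of operators
--
--     i = 0
--     while i < len(expression):
--         if expression[i] == '}':
--             # Check what comes after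
--             rest = expression[i+1:].strip()
--             if not rest:
--                 return i  # End of string, this is closing
--             # Check if operator follows
--             if rest[0] in operators:
--                 return i  # Operator follows, this is closing
--             # Otherwise, keep scanning (} is part of variable name)
--         i += 1
--
--     return len(expression)  # No closing brace found
-- ===== SOURCE B (Python) =====
-- def _find_variable_end(expression: str) -> int:
--     # One backward pass: track the first non-whitespace char after each position,
--     # so no slicing/stripping is needed at each '}'.
--     operators = '<>=!aon'
--     ans = len(expression)
--     nxt = None  # first non-whitespace character strictly after index i
--     for i in range(len(expression) - 1, -1, -1):
--         c = expression[i]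
--         if c == '}' and (nxt is None or nxt in operators):
--             ans = i
--         if not c.isspace():
--             nxt = c
--     return ans
-- ===== Notes on version B (the rewrite author's own statement) =====
-- stated objective: faster
-- what changed: Replaces A's forward scan that slices and strips the whole remainder of the string at every closing brace with a single backward pass that carries the first non-whitespace character seen so far, so each position is examined once.
import Mathlib
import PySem

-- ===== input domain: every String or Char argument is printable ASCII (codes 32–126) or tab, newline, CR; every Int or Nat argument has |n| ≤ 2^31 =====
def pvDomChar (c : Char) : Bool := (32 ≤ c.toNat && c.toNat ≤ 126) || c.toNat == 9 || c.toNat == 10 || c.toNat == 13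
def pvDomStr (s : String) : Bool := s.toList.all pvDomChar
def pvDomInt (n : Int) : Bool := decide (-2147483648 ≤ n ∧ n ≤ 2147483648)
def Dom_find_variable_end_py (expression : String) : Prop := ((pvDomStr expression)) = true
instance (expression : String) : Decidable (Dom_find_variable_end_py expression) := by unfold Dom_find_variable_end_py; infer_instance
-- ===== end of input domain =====

-- B replaces A's per-closing-brace slice+strip with a single backward pass tracking the next
-- non-whitespace character, turning the scan from quadratic to linear.

def pvOps : List Char := ['<', '>', '=', '!', 'a', 'o', 'n']

-- ===== PORT A =====
-- forward while-loop: at each closing brace, strip the rest of the string and inspect its first char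
def findVarEndGo (s : List Char) (i : Nat) : Int :=
  if h : i < s.length then
    if s[i] = '}' then
      match PySem.Chars.strip (PySem.List.slice s (some ((i : Int) + 1)) none) with
      | [] => (i : Int)
      | c :: _ => if c ∈ pvOps then (i : Int) else findVarEndGo s (i + 1)
    else findVarEndGo s (i + 1)
  else (s.length : Int)
termination_by s.length - i

def find_variable_end_py (expression : String) : Int :=
  findVarEndGo expression.toList 0

-- ===== PORT B =====
-- backward pass (foldr over the indexed chars), carrying (answer-so-far, next non-ws char)
def findVarEndStep (p : Char × Nat) (st : Int × Option Char) : Int × Option Char :=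
  let ans := if p.1 = '}' ∧ (match st.2 with | none => true | some d => pvOps.contains d) = true
             then (p.2 : Int) else st.1
  let nxt := if PySem.Chars.isspace p.1 then st.2 else some p.1
  (ans, nxt)

def find_variable_end_py_alt (expression : String) : Int :=
  let cs := expression.toList
  (cs.zipIdx.foldr findVarEndStep ((cs.length : Int), none)).1

-- ===== PRECONDITION & SPEC =====
def Spec_find_variable_end_py (expression : String) (out : Int) : Prop := out = find_variable_end_py_alt expression
instance (expression : String) (out : Int) : Decidable (Spec_find_variable_end_py expression out) := by unfold Spec_find_variable_end_py; infer_instance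

-- ===== CLAIM (what is proved, stated in full; the proofs are below) =====
def Claim_equal_find_variable_end_py : Prop := ∀ (expression : String), Dom_find_variable_end_py expression → Spec_find_variable_end_py expression (find_variable_end_py expression)

-- ===== LEMMAS AND PROOFS =====

-- reference recursion both ports are reduced to
def pvAns (t : List Char) (i : Nat) (n : Int) : Int :=
  match t with
  | [] => n
  | c :: r =>
    if c = '}' ∧ (match (r.dropWhile PySem.Chars.isspace).head? with
                  | none => true | some d => pvOps.contains d) = true
    then (i : Int) else pvAns r (i + 1) n

lemma fold_eq_pvAns (t : List Char) (i : Nat) (n : Int) :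
    (t.zipIdx i).foldr findVarEndStep (n, none)
      = (pvAns t i n, (t.dropWhile PySem.Chars.isspace).head?) := by
  induction t generalizing i with
  | nil => simp [pvAns]
  | cons c r ih =>
    simp only [List.zipIdx_cons, List.foldr_cons, ih (i + 1)]
    by_cases hw : PySem.Chars.isspace c
    · simp [findVarEndStep, pvAns, hw]
    · simp [findVarEndStep, pvAns, hw]

lemma strip_head (r : List Char) :
    PySem.Chars.strip r =
      match (r.dropWhile PySem.Chars.isspace) with
      | [] => ([] : List Char)
      | c :: _ => c :: (PySem.Chars.rstrip ((r.dropWhile PySem.Chars.isspace).tail)) := by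
  unfold PySem.Chars.strip PySem.Chars.lstrip
  cases hd : r.dropWhile PySem.Chars.isspace with
  | nil => simp [PySem.Chars.rstrip]
  | cons c x =>
    have hc : ¬ PySem.Chars.isspace c := by
      have := List.head?_dropWhile_not (p := PySem.Chars.isspace) (l := r)
      rw [hd] at this; simpa using this
    simp only [PySem.Chars.rstrip, List.reverse_cons, List.tail_cons]
    rw [List.dropWhile_append]
    by_cases he : (x.reverse.dropWhile PySem.Chars.isspace).isEmpty
    · simp [hc, List.isEmpty_iff.mp he]
    · simp [he]

lemma goA_eq_pvAns (t pre : List Char) :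
    findVarEndGo (pre ++ t) pre.length = pvAns t pre.length ((pre ++ t).length : Int) := by
  induction t generalizing pre with
  | nil =>
    rw [findVarEndGo]
    simp [pvAns]
  | cons c r ih =>
    rw [findVarEndGo]
    have hlt : pre.length < (pre ++ c :: r).length := by simp
    have hget : (pre ++ c :: r)[pre.length]'hlt = c := by
      rw [List.getElem_append_right (Nat.le_refl _)]
      simp
    have hslice : PySem.List.slice (pre ++ c :: r) (some ((pre.length : Int) + 1)) none = r := by
      have : ((pre.length : Int) + 1) = ((pre.length + 1 : Nat) : Int) := by push_cast; ring
      rw [this, PySem.List.slice_from_natCast]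
      simp
    have hstep : findVarEndGo (pre ++ c :: r) (pre.length + 1)
        = pvAns r (pre.length + 1) ((pre ++ c :: r).length : Int) := by
      have := ih (pre ++ [c])
      simpa using this
    simp only [hlt, dif_pos, hget, hslice]
    by_cases hc : c = '}'
    · subst hc
      simp only [strip_head r]
      cases hd : r.dropWhile PySem.Chars.isspace with
      | nil => simp [pvAns, hd]
      | cons d x =>
        by_cases hop : d ∈ pvOps
        · simp [pvAns, hd, hop]
        · simp only [pvAns, hd, hop, List.contains_eq_mem]
          simp [hop]
          rw [hstep]
          congr 1
          push_cast [List.length_append, List.length_cons]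
          ring
    · simp [pvAns, hc, hstep]

-- ===== VERDICT (by name: the statement is the Claim_ definition above) =====
theorem find_variable_end_py_spec : Claim_equal_find_variable_end_py := by
  intro expression _
  show findVarEndGo expression.toList 0
      = (expression.toList.zipIdx.foldr findVarEndStep ((expression.toList.length : Int), none)).1
  rw [fold_eq_pvAns]
  simpa using goA_eq_pvAns expression.toList []
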